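-- pv_equiv track=rewrite | github.com/Lucasbr2k14/becrowd_problems | 1273.py | get_major_strig
-- ===== SOURCE A (Python) =====
-- def get_major_strig(strings:list[str]) -> tuple[int]:
--   major:int = len(strings[0])
--   index:int = 0
--   for i in range(len(strings)):
--     if len(strings[i]) > major:
--       major = len(strings[i])
--       index = i
--   return index, major
-- ===== SOURCE B (Python) =====
-- def get_major_strig(strings: list[str]) -> tuple[int]:
--   lengths = [len(s) for s in strings]
--   major = max(lengths)
--   return lengths.index(major), major
-- ===== Notes on version B (the rewrite author's own statement) =====
-- stated objective: idiomatic
-- what changed: Replaces the seeded running-max index loop by a build-lengths-table then max()/list.index decomposition (earliest tie kept by .index's first-match rule).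
import Mathlib
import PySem

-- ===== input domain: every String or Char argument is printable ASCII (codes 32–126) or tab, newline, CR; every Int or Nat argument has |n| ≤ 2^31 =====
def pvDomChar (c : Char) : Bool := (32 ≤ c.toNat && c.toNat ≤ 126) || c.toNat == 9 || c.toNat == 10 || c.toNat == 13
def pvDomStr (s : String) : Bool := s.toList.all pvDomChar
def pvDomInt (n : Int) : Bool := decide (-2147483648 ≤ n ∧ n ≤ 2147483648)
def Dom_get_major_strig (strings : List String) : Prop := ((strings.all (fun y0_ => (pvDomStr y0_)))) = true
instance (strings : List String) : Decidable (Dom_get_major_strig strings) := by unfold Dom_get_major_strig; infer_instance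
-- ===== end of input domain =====

-- B replaces A's running-max index loop by a lengths-table + max + first-index decomposition; return value only.
-- ===== PORT A =====
def get_major_strig (strings : List String) : Int × Int :=
  let major : Int := PySem.Str.len (PySem.List.pyGetD strings 0 "")
  let index : Int := 0
  (PySem.List.pyRange 0 (PySem.List.len strings) 1).foldl
    (fun (st : Int × Int) i =>
      if PySem.Str.len (PySem.List.pyGetD strings i "") > st.2 then
        (i, PySem.Str.len (PySem.List.pyGetD strings i ""))
      else st)
    (index, major)

-- ===== PORT B =====
def get_major_strig_alt (strings : List String) : Int × Int :=
  let lengths : List Int := strings.map PySem.Str.len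
  let major : Int := (PySem.List.max? lengths (fun x => x)).getD 0
  (((PySem.List.index? lengths major).getD 0 : Nat), major)

-- ===== PRECONDITION & SPEC =====
-- A evaluates strings[0] (IndexError on the empty list), so Pre_ excludes [].
def Pre_get_major_strig (strings : List String) : Prop := strings ≠ []
instance (strings : List String) : Decidable (Pre_get_major_strig strings) := by unfold Pre_get_major_strig; infer_instance
def pvWitness_get_major_strig : List String := ["ab", "c", "def"]

def Spec_get_major_strig (strings : List String) (out : Int × Int) : Prop := out = get_major_strig_alt strings
instance (strings : List String) (out : Int × Int) : Decidable (Spec_get_major_strig strings out) := by unfold Spec_get_major_strig; infer_instance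

-- ===== CLAIM (what is proved, stated in full; the proofs are below) =====
def Claim_equal_get_major_strig : Prop := ∀ (strings : List String), Dom_get_major_strig strings → Pre_get_major_strig strings → Spec_get_major_strig strings (get_major_strig strings)

-- ===== LEMMAS AND PROOFS =====

-- first index of v in L (Int-valued; meaningful when v ∈ L)
def fidx : List Int → Int → Int
  | [], _ => 0
  | a :: t, v => if a = v then 0 else 1 + fidx t v

theorem fidx_eq_index? (L : List Int) (v : Int) (h : v ∈ L) :
    ((PySem.List.index? L v).getD 0 : Int) = fidx L v := by
  induction L with
  | nil => cases h
  | cons a t ih =>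
    by_cases hav : a = v
    · subst hav
      rw [PySem.List.index?_cons_self]
      simp [fidx]
    · have hv : v ∈ t := by
        rcases List.mem_cons.mp h with h' | h'
        · exact absurd h'.symm hav
        · exact h'
      rw [PySem.List.index?_cons_of_ne t hav]
      cases hk : PySem.List.index? t v with
      | none => exact absurd ((PySem.List.index?_eq_none_iff t v).mp hk) (by simpa using hv)
      | some k =>
        have := ih hv
        rw [hk] at this
        simp only [Option.map_some, Option.getD_some] at this ⊢
        simp [fidx, hav, ← this]
        ring

theorem le_foldl_max_self (t : List Int) (x : Int) : x ≤ t.foldl max x := by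
  induction t generalizing x with
  | nil => simp
  | cons a t ih => exact le_trans (le_max_left x a) (ih (max x a))

-- characterization of the argmax loop over enumerate
theorem loop_char {α : Type} (f : α → Int) (L : List α) (s i0 m0 : Int) :
    List.foldl (fun (st : Int × Int) (p : Int × α) =>
        if f p.2 > st.2 then (p.1, f p.2) else st) (i0, m0) (PySem.List.enumerate L s)
    = (if (L.map f).foldl max m0 > m0
        then (s + fidx (L.map f) ((L.map f).foldl max m0), (L.map f).foldl max m0)
        else (i0, m0)) := by
  induction L generalizing s i0 m0 with
  | nil => simp
  | cons a t ih =>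
    rw [PySem.List.enumerate_cons]
    simp only [List.foldl_cons, List.map_cons, List.foldl_cons]
    by_cases h : f a > m0
    · rw [if_pos h]
      rw [ih]
      have hmax : max m0 (f a) = f a := max_eq_right (le_of_lt h)
      rw [hmax]
      have hge : f a ≤ (t.map f).foldl max (f a) := le_foldl_max_self _ _
      by_cases h2 : (t.map f).foldl max (f a) > f a
      · rw [if_pos h2, if_pos (lt_trans h h2)]
        have hne : f a ≠ (t.map f).foldl max (f a) := ne_of_lt h2
        simp [fidx, hne]
        ring
      · rw [if_neg h2, if_pos (by omega)]
        have heq : (t.map f).foldl max (f a) = f a := le_antisymm (by omega) hge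
        rw [heq]
        simp [fidx]
    · rw [if_neg h]
      rw [ih]
      have hmax : max m0 (f a) = m0 := max_eq_left (by omega)
      rw [hmax]
      by_cases h2 : (t.map f).foldl max m0 > m0
      · rw [if_pos h2, if_pos h2]
        have hne : f a ≠ (t.map f).foldl max m0 := by omega
        simp [fidx, hne]
        ring
      · rw [if_neg h2, if_neg h2]

-- ===== VERDICT (by name: the statement is the Claim_ definition above) =====
theorem get_major_strig_spec : Claim_equal_get_major_strig := by
  intro strings _ hpre
  unfold Spec_get_major_strig get_major_strig get_major_strig_alt
  cases strings with
  | nil => exact absurd rfl hpre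
  | cons h0 rest =>
    simp only []
    -- turn the pyRange fold into a fold over enumerate
    have hen : PySem.List.enumerate (h0 :: rest) 0
        = (PySem.List.pyRange 0 (PySem.List.len (h0 :: rest)) 1).map
            (fun j => (j, PySem.List.pyGetD (h0 :: rest) j "")) :=
      PySem.List.enumerate_eq_map_pyRange (h0 :: rest) ""
    have hfold :
        (PySem.List.pyRange 0 (PySem.List.len (h0 :: rest)) 1).foldl
          (fun (st : Int × Int) i =>
            if PySem.Str.len (PySem.List.pyGetD (h0 :: rest) i "") > st.2 then
              (i, PySem.Str.len (PySem.List.pyGetD (h0 :: rest) i ""))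
            else st)
          (0, PySem.Str.len (PySem.List.pyGetD (h0 :: rest) 0 ""))
        = List.foldl (fun (st : Int × Int) (p : Int × String) =>
            if PySem.Str.len p.2 > st.2 then (p.1, PySem.Str.len p.2) else st)
            (0, PySem.Str.len (PySem.List.pyGetD (h0 :: rest) 0 ""))
            (PySem.List.enumerate (h0 :: rest) 0) := by
      rw [hen, List.foldl_map]
    rw [hfold]
    have h0get : PySem.List.pyGetD (h0 :: rest) 0 "" = h0 := by
      simp [PySem.List.pyGetD, PySem.List.pyGet?, PySem.List.pyIdx?]
    rw [h0get]
    rw [loop_char PySem.Str.len (h0 :: rest) 0 0 (PySem.Str.len h0)]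
    set x : Int := PySem.Str.len h0 with hx
    set t : List Int := rest.map PySem.Str.len with ht
    have hmap : (h0 :: rest).map PySem.Str.len = x :: t := by simp [hx, ht]
    rw [hmap]
    have hM : (x :: t).foldl max x = t.foldl max x := by simp
    rw [hM]
    have hmaj : (PySem.List.max? (x :: t) (fun y => y)).getD 0 = t.foldl max x := by
      rw [PySem.List.max?_id_cons]; rfl
    rw [hmaj]
    have hge : x ≤ t.foldl max x := le_foldl_max_self t x
    by_cases h2 : t.foldl max x > x
    · rw [if_pos h2]
      have hmem : t.foldl max x ∈ (x :: t) := by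
        have := PySem.List.max?_mem (xs := x :: t) (key := fun y => y)
          (m := t.foldl max x) (by rw [PySem.List.max?_id_cons])
        exact this
      rw [← fidx_eq_index? (x :: t) (t.foldl max x) hmem]
      simp
    · rw [if_neg h2]
      have heq : t.foldl max x = x := le_antisymm (by omega) hge
      rw [heq]
      rw [PySem.List.index?_cons_self]
      simp
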